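-- pv_equiv track=rewrite | github.com/djokicx/string-pack | string_pack.py | lastOccurMostFreqChar
-- ===== SOURCE A (Python) =====
-- def numOccur(s, c):
--     """
--     >>> numOccur('missisippi', 'i')
--     4
--     >>> numOccur('','d')
--     0
--     >>> numOccur('zzzzzzzzzzzzzzzzzzzzzz', 'z')
--     22
--     >>> numOccur('zzzzzzzzzzzzzzzzzzzzzzzzzzzzzzzzz', 'f')
--     0
--     >>> numOccur('dkjasldsklasadkljjskdajskadjklasdAASDASDSDAddsa', 'A')
--     4
--     >>> numOccur('iloveprogramming', 'i')
--     2
--     >>> numOccur('nemadanaadanemislimnatebe', 'a')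
--     6
--     >>> numOccur('python231ddddddd_code', 'd')
--     8
--     >>> numOccur('sssssssssssdakndsaklskadjl         ', ' ')
--     9
--     >>> numOccur(' ', ' ')
--     1
--
--     """
--     i = 0
--     for char in s:
--         if char == c:
--             i += 1
--     return i
--
-- def lastOccurMostFreqChar(s):
--     """
--     >>> lastOccurMostFreqChar('asdfdfasadsaaaa')
--     14
--     >>> lastOccurMostFreqChar('jdsajdsaj')
--     8
--     >>> lastOccurMostFreqChar('    ')
--     3
--     >>> lastOccurMostFreqChar('zvezdamijesve')
--     12
--     >>> lastOccurMostFreqChar('')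
--     -1
--     >>> lastOccurMostFreqChar('ddddddssssssssssssssdd')
--     19
--     >>> lastOccurMostFreqChar('')
--     -1
--     >>> lastOccurMostFreqChar('svakipredahjeluksuz')
--     17
--     >>> lastOccurMostFreqChar('uppers,downers,all-arounders')
--     26
--     >>> lastOccurMostFreqChar('microsoft')
--     6
--     >>> lastOccurMostFreqChar('victory')
--     6
--     """
--     count_mf = 0
--     elem_mf = -1
--     for elem in range(len(s)):
--         count = numOccur(s, s[elem])
--         if count >= count_mf:
--             count_mf = count
--             elem_mf = elem
--     return elem_mf
-- ===== SOURCE B (Python) =====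
-- def lastOccurMostFreqChar(s):
--     # Build a frequency table in one pass, then scan indices in reverse and
--     # return the first index whose character has the maximal frequency.
--     freq = {}
--     for ch in s:
--         freq[ch] = freq.get(ch, 0) + 1
--     if not freq:
--         return -1
--     m = max(freq.values())
--     for i in range(len(s) - 1, -1, -1):
--         if freq[s[i]] == m:
--             return i
--     return -1  # unreachable: m is a value of freq
-- ===== Notes on version B (the rewrite author's own statement) =====
-- stated objective: faster
-- what changed: Replaces A's per-index recount (numOccur called for every position, O(n^2)) by one frequency-table pass plus a reverse early-exit scan for the first index whose character reaches the maximal frequency.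
import Mathlib
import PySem

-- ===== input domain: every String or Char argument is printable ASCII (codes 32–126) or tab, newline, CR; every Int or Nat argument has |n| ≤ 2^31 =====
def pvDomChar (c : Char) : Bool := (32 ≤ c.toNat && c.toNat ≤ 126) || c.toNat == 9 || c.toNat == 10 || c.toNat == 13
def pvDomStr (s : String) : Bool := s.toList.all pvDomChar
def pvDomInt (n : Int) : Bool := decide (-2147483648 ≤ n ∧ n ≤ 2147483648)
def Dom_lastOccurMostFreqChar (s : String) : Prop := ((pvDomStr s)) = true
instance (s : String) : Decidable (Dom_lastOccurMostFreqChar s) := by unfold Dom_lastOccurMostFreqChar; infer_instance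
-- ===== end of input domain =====

-- B replaces A's per-index recount by one frequency-table pass plus a reverse early-exit scan (faster).

-- ===== PORT A =====
-- numOccur: count occurrences of c in s by a loop
def numOccur (s : String) (c : Char) : Int :=
  s.toList.foldl (fun i ch => if ch == c then i + 1 else i) 0

def lastOccurMostFreqChar (s : String) : Int :=
  -- for elem in range(len(s)):  count = numOccur(s, s[elem]); if count >= count_mf: update
  -- s[elem] is always in range (elem < len(s)), so the index read is exact
  (List.foldl
    (fun st elem =>
      let count := numOccur s (s.toList.getD elem ' ')
      if st.1 ≤ count then (count, (elem : Int)) else st)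
    ((0 : Int), (-1 : Int)) (List.range s.toList.length)).2

-- ===== PORT B =====
-- the reverse loop 'for i in range(len(s)-1, -1, -1): if freq[s[i]] == m: return i'
-- (argument n counts how many indices n-1, n-2, …, 0 remain; base case = loop exhausted)
def altRevScan (cs : List Char) (freq : PySem.Dict Char Int) (m : Int) : Nat → Int
  | 0 => -1
  | n + 1 => if freq.getD (cs.getD n ' ') 0 == m then (n : Int) else altRevScan cs freq m n

def lastOccurMostFreqChar_alt (s : String) : Int :=
  let cs := s.toList
  -- freq[ch] = freq.get(ch, 0) + 1 over the string
  let freq := List.foldl (fun d ch => d.modify ch 0 (fun v => v + 1))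
    (PySem.Dict.empty : PySem.Dict Char Int) cs
  -- if not freq: return -1; m = max(freq.values())
  match PySem.List.max? freq.values id with
  | none => -1
  | some m => altRevScan cs freq m cs.length

-- ===== PRECONDITION & SPEC =====
def Spec_lastOccurMostFreqChar (s : String) (out : Int) : Prop := out = lastOccurMostFreqChar_alt s
instance (s : String) (out : Int) : Decidable (Spec_lastOccurMostFreqChar s out) := by unfold Spec_lastOccurMostFreqChar; infer_instance

-- ===== CLAIM (what is proved, stated in full; the proofs are below) =====
def Claim_equal_lastOccurMostFreqChar : Prop := ∀ (s : String), Dom_lastOccurMostFreqChar s → Spec_lastOccurMostFreqChar s (lastOccurMostFreqChar s)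

-- ===== LEMMAS AND PROOFS =====

-- running maximum of counts over the first n indices (A's count_mf after n steps)
def pvM (cs : List Char) : Nat → Int
  | 0 => 0
  | n + 1 => max (pvM cs n) ((cs.count (cs.getD n ' ') : Int))

-- A's elem_mf after n steps: last index among 0..n-1 whose count reaches the running maximum
def pvL (cs : List Char) : Nat → Int
  | 0 => -1
  | n + 1 => if pvM cs n ≤ (cs.count (cs.getD n ' ') : Int) then (n : Int) else pvL cs n

lemma numOccur_eq (s : String) (c : Char) : numOccur s c = (s.toList.count c : Int) := by
  unfold numOccur
  rw [PySem.List.foldl_count_if (fun x => x == c) s.toList 0]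
  simp [List.count]

lemma foldA (s : String) (n : Nat) :
    List.foldl
      (fun st elem =>
        let count := numOccur s (s.toList.getD elem ' ')
        if st.1 ≤ count then (count, (elem : Int)) else st)
      ((0 : Int), (-1 : Int)) (List.range n) = (pvM s.toList n, pvL s.toList n) := by
  induction n with
  | zero => simp [pvM, pvL]
  | succ n ih =>
    rw [List.range_succ, List.foldl_append, ih]
    simp only [List.foldl_cons, List.foldl_nil, numOccur_eq, pvM, pvL]
    by_cases h : pvM s.toList n ≤ (s.toList.count (s.toList.getD n ' ') : Int)
    · rw [if_pos h, if_pos h, max_eq_right h]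
    · rw [if_neg h, if_neg h, max_eq_left (le_of_not_ge h)]

lemma scanB (cs : List Char) (freq : PySem.Dict Char Int)
    (hf : ∀ c, freq.getD c 0 = (cs.count c : Int)) (n : Nat) :
    altRevScan cs freq (pvM cs n) n = pvL cs n := by
  induction n with
  | zero => simp [altRevScan, pvL]
  | succ n ih =>
    simp only [altRevScan, pvM, pvL, hf]
    by_cases h : pvM cs n ≤ (cs.count (cs.getD n ' ') : Int)
    · rw [max_eq_right h, if_pos h]
      simp
    · rw [max_eq_left (le_of_not_ge h), if_neg h, ← ih]
      have hne : ((cs.count (cs.getD n ' ') : Int) == pvM cs n) = false := by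
        have := le_of_not_ge h
        simp only [beq_eq_false_iff_ne, ne_eq]
        omega
      rw [hne]
      simp

lemma count_le_pvM (cs : List Char) (n : Nat) (i : Nat) (hi : i < n) :
    (cs.count (cs.getD i ' ') : Int) ≤ pvM cs n := by
  induction n with
  | zero => omega
  | succ n ih =>
    rcases Nat.lt_succ_iff_lt_or_eq.mp hi with h | h
    · exact le_trans (ih h) (le_max_left _ _)
    · subst h; exact le_max_right _ _

lemma pvM_mem (cs : List Char) (n : Nat) (hn : n ≠ 0) (hle : n ≤ cs.length) :
    ∃ c ∈ cs, pvM cs n = (cs.count c : Int) := by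
  induction n with
  | zero => omega
  | succ n ih =>
    have hn' : n < cs.length := by omega
    have hmem : cs.getD n ' ' ∈ cs := by
      rw [List.getD_eq_getElem cs ' ' hn']
      exact List.getElem_mem hn'
    by_cases h : pvM cs n ≤ (cs.count (cs.getD n ' ') : Int)
    · exact ⟨cs.getD n ' ', hmem, by rw [pvM, max_eq_right h]⟩
    · have hn0 : n ≠ 0 := by
        rintro rfl
        exact h (le_trans (by rw [pvM]) (Int.natCast_nonneg _))
      obtain ⟨c, hc, hcM⟩ := ih hn0 (by omega)
      exact ⟨c, hc, by rw [pvM, max_eq_left (le_of_not_ge h), hcM]⟩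

lemma max_values_counter (cs : List Char) (h : cs ≠ []) :
    PySem.List.max? (PySem.Dict.counter cs).values id = some (pvM cs cs.length) := by
  have hkeys := PySem.Dict.keys_counter cs
  have hnodup : (PySem.Dict.counter cs).keys.Nodup := by
    rw [hkeys]; exact PySem.Set.nodup_ofList cs
  have hvals : (PySem.Dict.counter cs).values
      = List.map (fun k => ((cs.count k : Nat) : Int)) (PySem.Set.ofList cs) := by
    rw [PySem.Dict.values_eq_map_keys _ hnodup 0, hkeys]
    exact List.map_congr_left (fun k _ => PySem.Dict.getD_counter cs k)
  -- values is nonempty, so max? is some m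
  have hne : (PySem.Dict.counter cs).values ≠ [] := by
    rcases List.exists_mem_of_ne_nil cs h with ⟨c, hc⟩
    have : ((cs.count c : Nat) : Int) ∈ (PySem.Dict.counter cs).values := by
      rw [hvals]
      exact List.mem_map_of_mem ((PySem.Set.mem_ofList cs c).mpr hc)
    intro hE; rw [hE] at this; exact (List.not_mem_nil) this
  rcases hm : PySem.List.max? (PySem.Dict.counter cs).values id with _ | m
  · exact absurd ((PySem.List.max?_eq_none_iff _ _).mp hm) hne
  · have hmem := PySem.List.max?_mem hm
    have hub := PySem.List.max?_isMax hm
    -- m ≤ pvM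
    have h1 : m ≤ pvM cs cs.length := by
      rw [hvals] at hmem
      rcases List.mem_map.mp hmem with ⟨k, hk, hkm⟩
      have hk' : k ∈ cs := (PySem.Set.mem_ofList cs k).mp hk
      rcases List.mem_iff_getElem.mp hk' with ⟨i, hi, hik⟩
      have := count_le_pvM cs cs.length i hi
      rw [List.getD_eq_getElem cs ' ' hi, hik] at this
      omega
    -- pvM ≤ m
    have h2 : pvM cs cs.length ≤ m := by
      obtain ⟨c, hc, hcM⟩ := pvM_mem cs cs.length
        (by simpa [List.length_eq_zero_iff] using h) le_rfl
      have hcv : ((cs.count c : Nat) : Int) ∈ (PySem.Dict.counter cs).values := by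
        rw [hvals]
        exact List.mem_map_of_mem ((PySem.Set.mem_ofList cs c).mpr hc)
      have := hub _ hcv
      simp only [id] at this
      omega
    have : m = pvM cs cs.length := le_antisymm h1 h2
    rw [this]

-- ===== VERDICT (by name: the statement is the Claim_ definition above) =====
theorem lastOccurMostFreqChar_spec : Claim_equal_lastOccurMostFreqChar := by
  intro s _
  unfold Spec_lastOccurMostFreqChar
  simp only [lastOccurMostFreqChar, lastOccurMostFreqChar_alt]
  rw [foldA]
  rw [← PySem.Dict.counter_eq_foldl]
  by_cases h : s.toList = []
  · simp [h, pvL, PySem.Dict.counter, PySem.Dict.empty, PySem.List.max?]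
  · rw [max_values_counter s.toList h]
    exact (scanB s.toList _ (fun c => PySem.Dict.getD_counter s.toList c) s.toList.length).symm
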